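-- pv_equiv track=rewrite | github.com/jwong1MHS/python | intro_loops.py | countPrimeDigits
-- ===== SOURCE A (Python) =====
-- def isPrime(n):
--   return n == 2 or n == 3 or n == 5 or n == 7
--
-- def countPrimeDigits(n):
--   count = 0
--   n = abs(n)
--   while n > 0:
--     if isPrime(n % 10):
--       count = count + 1
--     n = n // 10
--   return count
-- ===== SOURCE B (Python) =====
-- def countPrimeDigits(n):
--   return sum(1 for ch in str(abs(n)) if ch in '2357')
-- ===== Notes on version B (the rewrite author's own statement) =====
-- stated objective: idiomatic
-- what changed: Replaces the arithmetic mod/div digit-extraction while-loop with a single pass over the decimal string str(abs(n)), counting characters that are in '2357'.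
import Mathlib
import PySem

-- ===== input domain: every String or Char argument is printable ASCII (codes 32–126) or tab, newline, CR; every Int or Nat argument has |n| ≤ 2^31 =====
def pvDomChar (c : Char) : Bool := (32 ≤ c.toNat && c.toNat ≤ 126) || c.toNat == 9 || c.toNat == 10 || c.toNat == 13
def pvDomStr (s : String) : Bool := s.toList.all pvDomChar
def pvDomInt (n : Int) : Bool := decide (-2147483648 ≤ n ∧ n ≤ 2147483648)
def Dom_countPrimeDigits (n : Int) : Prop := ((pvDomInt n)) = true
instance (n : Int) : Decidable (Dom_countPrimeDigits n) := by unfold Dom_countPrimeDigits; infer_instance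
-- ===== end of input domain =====

-- B replaces A's mod/div digit-extraction loop with a count over the decimal string str(abs(n)).


-- ===== PORT A =====
-- isPrime helper of A
def isPrimeA (n : Int) : Bool := n == 2 || n == 3 || n == 5 || n == 7

-- the while-loop of A: while n > 0: if isPrime(n % 10): count += 1; n //= 10
def loopA (n count : Int) : Int :=
  if h : n > 0 then
    loopA (PySem.Int.floordiv n 10)
      (if isPrimeA (PySem.Int.mod n 10) then count + 1 else count)
  else count
termination_by n.toNat
decreasing_by
  have h10 : PySem.Int.floordiv n 10 = n / 10 := PySem.Int.floordiv_eq_ediv_of_pos (by omega)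
  rw [h10]; omega

def countPrimeDigits (n : Int) : Int := loopA |n| 0

-- ===== PORT B =====
-- sum(1 for ch in str(abs(n)) if ch in '2357')
def countPrimeDigits_alt (n : Int) : Int :=
  ((PySem.Int.toStr |n|).toList.countP (fun c => ("2357".toList).contains c) : Int)

-- ===== PRECONDITION & SPEC =====
def Spec_countPrimeDigits (n : Int) (out : Int) : Prop := out = countPrimeDigits_alt n
instance (n : Int) (out : Int) : Decidable (Spec_countPrimeDigits n out) := by unfold Spec_countPrimeDigits; infer_instance

-- ===== CLAIM (what is proved, stated in full; the proofs are below) =====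
def Claim_equal_countPrimeDigits : Prop := ∀ (n : Int), Dom_countPrimeDigits n → Spec_countPrimeDigits n (countPrimeDigits n)

-- ===== LEMMAS AND PROOFS =====

-- B's character predicate
def pChar : Char → Bool := fun c => ("2357".toList).contains c

-- the character test agrees with A's arithmetic primality test on single digits
lemma pChar_digit (d : Nat) (h : d < 10) : pChar (Nat.digitChar d) = isPrimeA (d : Int) := by
  interval_cases d <;> decide

-- accumulator lemma for A's loop
lemma loopA_add (n c : Int) : loopA n c = loopA n 0 + c := by
  by_cases h : n > 0
  · conv_lhs => rw [loopA, dif_pos h]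
    conv_rhs => rw [loopA, dif_pos h]
    rw [loopA_add (PySem.Int.floordiv n 10) (if isPrimeA (PySem.Int.mod n 10) then c + 1 else c),
        loopA_add (PySem.Int.floordiv n 10) (if isPrimeA (PySem.Int.mod n 10) then (0:Int) + 1 else 0)]
    split_ifs <;> ring
  · conv_lhs => rw [loopA, dif_neg h]
    conv_rhs => rw [loopA, dif_neg h]
    ring
termination_by n.toNat
decreasing_by
  all_goals
    have h10 : PySem.Int.floordiv n 10 = n / 10 := PySem.Int.floordiv_eq_ediv_of_pos (by omega)
    rw [h10]; omega

-- the digit-emitting core of str() counts the same primes as A's loop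
lemma core_count (f : Nat) : ∀ (m : Nat) (l : List Char), m < f → 0 < m →
    ((Nat.toDigitsCore 10 f m l).countP pChar : Int) = loopA (m : Int) 0 + (l.countP pChar : Int) := by
  induction f with
  | zero => intro m l hf _; omega
  | succ f ih =>
    intro m l hf hm
    have hfd : PySem.Int.floordiv (m : Int) 10 = ((m / 10 : Nat) : Int) := by
      rw [PySem.Int.floordiv_eq_ediv_of_pos (by omega)]; omega
    have hmod : PySem.Int.mod (m : Int) 10 = ((m % 10 : Nat) : Int) := by
      rw [PySem.Int.mod_eq_emod_of_pos (by omega)]; omega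
    have hloop : loopA (m : Int) 0 =
        loopA ((m / 10 : Nat) : Int) 0 + (if pChar (Nat.digitChar (m % 10)) then (1:Int) else 0) := by
      rw [loopA, dif_pos (by exact_mod_cast hm : (m : Int) > 0)]
      rw [hfd, hmod, pChar_digit (m % 10) (Nat.mod_lt m (by omega))]
      rw [loopA_add]
      split_ifs <;> ring
    rw [Nat.toDigitsCore]
    by_cases hq : m / 10 = 0
    · simp only [hq, if_true]
      rw [List.countP_cons, hloop, hq]
      rw [loopA, dif_neg (by omega : ¬ ((0:Nat) : Int) > 0)]
      split_ifs with hp <;> push_cast <;> ring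
    · simp only [hq, if_false]
      rw [ih (m / 10) _ (by omega) (by omega)]
      rw [List.countP_cons, hloop]
      split_ifs with hp <;> push_cast <;> ring

-- ===== VERDICT (by name: the statement is the Claim_ definition above) =====
theorem countPrimeDigits_spec : Claim_equal_countPrimeDigits := by
  intro n _
  unfold Spec_countPrimeDigits countPrimeDigits countPrimeDigits_alt
  rw [PySem.Int.toList_toStr]
  rw [show |n| = (n.natAbs : Int) from by rw [Int.abs_eq_natAbs]]
  unfold PySem.Int.toChars
  simp only [show ¬((n.natAbs : Int) < 0) from by omega, if_false, Int.toNat_natCast]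
  unfold Nat.toDigits
  by_cases h0 : n.natAbs = 0
  · rw [h0, loopA, dif_neg (by omega : ¬ ((0:Nat) : Int) > 0)]
    norm_num [Nat.toDigitsCore, List.countP, List.countP.go, pChar]
  · have h := core_count (n.natAbs + 1) n.natAbs [] (by omega) (by omega)
    simp only [List.countP_nil, Nat.cast_zero, add_zero] at h
    exact h.symm
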